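-- pv_equiv track=rewrite | github.com/MwendiaTech/Multi-Agent-Deep-Reinforcement-Learning-for-Traffic-Signal-Control | epics-sumo-4.4/sumolib/utils.py | rev2key
-- ===== SOURCE A (Python) =====
-- def rev2key(rev):
--     """convert a revision number to a comparable string.
--
--     This is needed to compare revision tags.
--
--     Examples of valid revisions:
--
--       2.3.4
--       2-3-4
--       R2-3-4
--       seq-2.3.4
--       head
--       trunk
--
--     Here are some examples:
--     >>> rev2key("R2-3-4")
--     '002.003.004'
--     >>> rev2key("2-3-4")
--     '002.003.004'
--     >>> rev2key("head")
--     '-head'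
--     >>> rev2key("test")
--     '-test'
--     >>> rev2key("test")<rev2key("R2-3-4")
--     True
--     >>> rev2key("R2-3-3")<rev2key("R2-3-4")
--     True
--     >>> rev2key("R2-3-5")<rev2key("R2-3-4")
--     False
--     >>> rev2key("R2-4-3")<rev2key("R2-3-4")
--     False
--     >>> rev2key("R1-3-4")<rev2key("R2-3-4")
--     True
--     >>> rev2key("R3-3-4")<rev2key("R2-3-4")
--     False
--     """
--
--     if rev=="":
--         return "-"
--     t= tag2version(rev)
--     if not t[0].isdigit():
--         return "-" + rev
--     rev= t
--     # allow "-" and "." as separator for numbers: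
--     rev= rev.replace("-",".")
--     l= rev.split(".")
--     n= []
--     # reformat all numbers in a 3-digit form:
--     for e in l:
--         try:
--             n.append("%03d" % int(e))
--         except ValueError as _:
--             n.append(str(e))
--     return ".".join(n)
--
-- def tag2version(ver):
--     """convert a tag to a version.
--
--     Here are some examples:
--     >>> tag2version("1-2")
--     '1-2'
--     >>> tag2version("R1-2")
--     '1-2'
--     >>> tag2version("R-1-2")
--     '1-2'
--     >>> tag2version("seq-1-2")
--     '1-2'
--     >>> tag2version("head")
--     'head'
--     >>> tag2version("")
--     ''
--     """
--     if not ver: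
--         return ver
--     mode=0
--     # pylint: disable=consider-using-enumerate
--     for i in range(len(ver)):
--         if mode==0:
--             if ver[i].isalpha():
--                 continue
--             mode=1
--         if mode==1:
--             if ver[i]=="-" or ver[i]=="_":
--                 mode=2
--                 continue
--             mode=2
--         if mode==2:
--             if ver[i].isdigit():
--                 return ver[i:]
--             return ver
--     return ver
-- ===== SOURCE B (Python) =====
-- import re
--
-- def rev2key(rev):
--     """convert a revision number to a comparable string (regex-based rewrite)."""
--     rest = rev[re.match(r'[A-Za-z]*[-_]?', rev).end():]
--     tag = rest if rest[:1].isdigit() else rev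
--     if not tag[:1].isdigit():
--         return "-" + rev
--     return ".".join(_piece(e) for e in tag.replace("-", ".").split("."))
--
-- def _piece(e):
--     try:
--         return "%03d" % int(e)
--     except ValueError:
--         return e
-- ===== Notes on version B (the rewrite author's own statement) =====
-- stated objective: idiomatic
-- what changed: The three-state character loop of tag2version is inlined into rev2key and replaced by a single regex prefix match (skip leading letters plus at most one '-'/'_' separator, then test for a digit), and the explicit append loop over the pieces becomes a comprehension; the C-level regex scan replaces the per-character Python loop.
import Mathlib
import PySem

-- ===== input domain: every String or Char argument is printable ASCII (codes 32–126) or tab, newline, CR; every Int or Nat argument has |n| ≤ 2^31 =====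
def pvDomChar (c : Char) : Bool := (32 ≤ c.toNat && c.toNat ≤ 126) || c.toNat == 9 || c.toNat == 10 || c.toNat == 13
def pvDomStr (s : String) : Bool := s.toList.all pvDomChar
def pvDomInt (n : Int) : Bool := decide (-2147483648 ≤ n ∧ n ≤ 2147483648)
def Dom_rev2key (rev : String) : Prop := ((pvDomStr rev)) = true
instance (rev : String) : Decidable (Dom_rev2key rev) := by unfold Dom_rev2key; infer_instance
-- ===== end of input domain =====

-- B replaces A's three-state character loop (tag2version) by a single prefix parse
-- (skip leading letters, then at most one '-'/'_') and the explicit append loop by a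
-- comprehension; objective: idiomatic, same cost.

-- ===== PORT A =====

-- "%03d" % n  and  str(n): "%03d" % n is exactly str(n).zfill(3) for every int (zero-pad
-- to width 3, the sign counted in the width) — ported as zfill (toChars n) 3.
def pvFmt3 (e : List Char) : List Char :=
  match PySem.Int.ofChars? e with          -- try: int(e)
  | some n => PySem.Chars.zfill (PySem.Int.toChars n) 3
  | none   => e                            -- except ValueError: str(e) = e

-- the 'for i in range(len(ver))' loop of tag2version: the body only reads ver[i] and
-- ver[i:], so the suffix ver[i:] is carried directly; 'mode' is the Python variable.
def pvTagGoA (full : List Char) (mode : Nat) : List Char → List Char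
  | [] => full                                              -- loop ends: return ver
  | c :: rest =>
    if mode = 0 ∧ PySem.Chars.isalpha c then                -- mode 0: letter → continue
      pvTagGoA full 0 rest
    else if mode ≠ 2 ∧ (c = '-' ∨ c = '_') then             -- mode 1: one separator → mode 2, continue
      pvTagGoA full 2 rest
    else if PySem.Chars.isdigit c then c :: rest else full  -- mode 2: digit → ver[i:], else ver

def pvTag2version (ver : List Char) : List Char :=
  if ver = [] then ver else pvTagGoA ver 0 ver

def rev2key (rev : String) : String :=
  let ver := rev.toList
  if ver = [] then "-"
  else
    let t := pvTag2version ver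
    -- t[0]: t is provably nonempty here (tag2version of a nonempty string); headD = t[0]
    if ¬ (PySem.Chars.isdigit (t.headD ' ') = true) then String.ofList ('-' :: ver)
    else
      let l := PySem.Chars.splitOn (PySem.Chars.replace t ['-'] ['.']) ['.']
      let n := l.foldl (fun acc e => acc ++ [pvFmt3 e]) []   -- for e in l: n.append(...)
      String.ofList (PySem.Chars.join ['.'] n)

-- ===== PORT B =====

-- re.match(r'[A-Za-z]*[-_]?', rev).end(): on the ASCII domain [A-Za-z] is exactly
-- Python's str.isalpha, so the matched prefix = leading alpha run + one optional '-'/'_'.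
def pvStripB (ver : List Char) : List Char :=
  match ver.dropWhile PySem.Chars.isalpha with
  | c :: t => if c = '-' ∨ c = '_' then t else c :: t
  | [] => []

-- rest[:1].isdigit() / tag[:1].isdigit(): first char is a digit (false on empty)
def pvHeadDigit (l : List Char) : Bool :=
  match l with
  | c :: _ => PySem.Chars.isdigit c
  | [] => false

def rev2key_alt (rev : String) : String :=
  let ver := rev.toList
  let rest := pvStripB ver
  let tag := if pvHeadDigit rest then rest else ver
  if ¬ (pvHeadDigit tag = true) then String.ofList ('-' :: ver)
  else
    String.ofList (PySem.Chars.join ['.']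
      ((PySem.Chars.splitOn (PySem.Chars.replace tag ['-'] ['.']) ['.']).map pvFmt3))

-- ===== PRECONDITION & SPEC =====
def Spec_rev2key (rev : String) (out : String) : Prop := out = rev2key_alt rev
instance (rev : String) (out : String) : Decidable (Spec_rev2key rev out) := by unfold Spec_rev2key; infer_instance

-- ===== CLAIM (what is proved, stated in full; the proofs are below) =====
def Claim_equal_rev2key : Prop := ∀ (rev : String), Dom_rev2key rev → Spec_rev2key rev (rev2key rev)

-- ===== LEMMAS AND PROOFS =====

-- after a separator, A's loop is a single head-digit test
theorem pvTagGoA_two (full : List Char) (t : List Char) :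
    pvTagGoA full 2 t = if pvHeadDigit t then t else full := by
  cases t with
  | nil => simp [pvTagGoA, pvHeadDigit]
  | cons c r =>
    simp only [pvTagGoA, pvHeadDigit]
    split_ifs with h1 h2 h3 <;> simp_all

-- A's mode-0/1 phase = dropWhile the letters, then handle one optional separator
theorem pvTagGoA_zero (full : List Char) (l : List Char) :
    pvTagGoA full 0 l =
      (match l.dropWhile PySem.Chars.isalpha with
       | [] => full
       | c :: t =>
         if c = '-' ∨ c = '_' then (if pvHeadDigit t then t else full)
         else (if pvHeadDigit (c :: t) then c :: t else full)) := by
  induction l with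
  | nil => simp [pvTagGoA]
  | cons c r ih =>
    by_cases ha : PySem.Chars.isalpha c = true
    · simpa [pvTagGoA, ha] using ih
    · by_cases hs : c = '-' ∨ c = '_'
      · simp [pvTagGoA, ha, hs, pvTagGoA_two]
      · simp [pvTagGoA, ha, hs, pvHeadDigit]

-- A's tag2version and B's prefix parse pick the same tag (for nonempty input)
theorem pvTag_eq (ver : List Char) (h : ver ≠ []) :
    pvTag2version ver = (if pvHeadDigit (pvStripB ver) then pvStripB ver else ver) := by
  unfold pvTag2version pvStripB
  rw [if_neg h, pvTagGoA_zero]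
  cases hd : ver.dropWhile PySem.Chars.isalpha with
  | nil => simp [pvHeadDigit]
  | cons c t =>
    by_cases hs : c = '-' ∨ c = '_'
    · simp [hs]
    · simp [hs]

-- B's tag never hides a digit head: if the parsed rest fails the digit test, the
-- fallback 'ver' has a digit head only when rest = ver (dropWhile dropped nothing,
-- head not a separator)
theorem pvHead_fallback (ver : List Char) (hnd : pvHeadDigit (pvStripB ver) = false) :
    pvHeadDigit ver = pvHeadDigit (pvStripB ver) := by
  cases ver with
  | nil => simp [pvStripB]
  | cons c r =>
    by_cases hdig : PySem.Chars.isdigit c = true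
    · -- digit head: not alpha, not a separator, so stripB keeps it — contradiction with hnd
      exfalso
      have ha : PySem.Chars.isalpha c = false := by
        revert hdig
        simp [PySem.Chars.isdigit, PySem.Chars.isalpha, PySem.Chars.isupper,
              PySem.Chars.islower, Char.le_def, UInt32.le_iff_toNat_le]
        omega
      have hs : ¬ (c = '-' ∨ c = '_') := by
        rintro (rfl | rfl) <;> simp [PySem.Chars.isdigit] at hdig
      rw [pvStripB] at hnd
      simp only [List.dropWhile_cons, ha, Bool.false_eq_true, reduceIte] at hnd
      simp [hs, pvHeadDigit, hdig] at hnd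
    · rw [hnd]; simp [pvHeadDigit, hdig]

-- (l.map (fun x => [f x])).flatten = l.map f — closes the append-loop vs map goal
theorem pvMapSingFlatten {α β : Type} (f : α → β) (l : List α) :
    (l.map (fun x => [f x])).flatten = l.map f := by
  induction l with
  | nil => rfl
  | cons a t ih => simp [ih]

-- ===== VERDICT (by name: the statement is the Claim_ definition above) =====
theorem rev2key_spec : Claim_equal_rev2key := by
  intro rev _
  show rev2key rev = rev2key_alt rev
  unfold rev2key rev2key_alt
  by_cases hnil : rev.toList = []
  · simp [hnil, pvStripB, pvHeadDigit]
  · simp only [if_neg hnil]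
    rw [pvTag_eq _ hnil]
    by_cases hrd : pvHeadDigit (pvStripB rev.toList) = true
    · -- tag = stripB, head digit: both take the numeric branch
      simp only [pvHeadDigit] at *
      cases hs : pvStripB rev.toList with
      | nil => rw [hs] at hrd; simp [pvHeadDigit] at hrd
      | cons c t =>
        rw [hs] at hrd
        simp only [pvHeadDigit] at hrd
        simp [pvHeadDigit, hrd]
        exact congrArg String.ofList (congrArg _ (pvMapSingFlatten _ _))
    · -- tag = ver, and ver's head is no digit either: both return "-" + rev
      have hf := pvHead_fallback rev.toList (by simpa using hrd)
      simp only [Bool.not_eq_true] at hrd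
      rw [hrd] at hf ⊢
      by_cases hvd : pvHeadDigit rev.toList = true
      · rw [hf] at hvd; simp at hvd
      · simp only [Bool.not_eq_true] at hvd
        cases hv : rev.toList with
        | nil => exact absurd hv hnil
        | cons c t =>
          rw [hv] at hvd
          simp only [pvHeadDigit] at hvd
          simp [hvd, pvHeadDigit]
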